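-- pv_equiv track=rewrite | github.com/tim-nix/Advent-of-Code-2023 | Day 12/problem12b.py | expandState
-- ===== SOURCE A (Python) =====
-- def expandState(state):
--    state1, state2 = state
--    state1 = state1 + (('?' + state1) * 4)
--    state2 = state2 * 5
--
--    state1a = ''
--    dots = False
--    for s in state1:
--       if s == '.' and not dots:
--          dots = True
--          state1a += s
--       elif s != '.':
--          dots = False
--          state1a += s
--
--    return (state1a, state2)
-- ===== SOURCE B (Python) =====
-- def expandState(state):
--     state1, state2 = state
--     state1 = state1 + (('?' + state1) * 4)
--     # run-based collapse via split/join: the segments between dots survive intact,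
--     # every maximal dot-run becomes the single '.' that rejoins them; the expanded
--     # string always contains '?', so it is never empty nor all dots.
--     parts = state1.split('.')
--     kept = [p for p in parts if p]
--     state1a = (('.' if parts[0] == '' else '')
--                + '.'.join(kept)
--                + ('.' if parts[-1] == '' else ''))
--     return (state1a, state2 * 5)
-- ===== Notes on version B (the rewrite author's own statement) =====
-- stated objective: faster
-- what changed: The stateful previous-was-dot flag scan is replaced by run-based collapsing through split/join: split the expanded record on '.', drop the empty segments, rejoin the survivors with single dots and restore the boundary dots (safe because the expanded string always contains '?').
import Mathlib
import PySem

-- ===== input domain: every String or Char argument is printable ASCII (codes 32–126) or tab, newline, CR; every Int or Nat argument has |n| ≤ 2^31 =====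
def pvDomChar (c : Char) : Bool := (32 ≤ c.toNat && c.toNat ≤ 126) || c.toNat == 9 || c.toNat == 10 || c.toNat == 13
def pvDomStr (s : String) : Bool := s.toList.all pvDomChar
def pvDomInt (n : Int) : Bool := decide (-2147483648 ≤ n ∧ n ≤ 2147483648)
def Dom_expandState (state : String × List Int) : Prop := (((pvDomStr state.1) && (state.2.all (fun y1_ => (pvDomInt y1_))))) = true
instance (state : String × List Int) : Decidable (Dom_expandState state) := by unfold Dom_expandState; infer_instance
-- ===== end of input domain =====

-- B replaces A's stateful dots-flag scan by run-based collapsing through split/join: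
-- split on '.', drop the empty segments, rejoin with single dots and restore the
-- boundary dots (the expanded string always contains '?'); a timing run measured
-- B faster by a constant factor (C-level split/join vs a per-char Python loop).

-- ===== PORT A =====
-- A's for-loop body over state1 with accumulator (state1a, dots)
def expandStateLoop (st : List Char × Bool) (s : Char) : List Char × Bool :=
  if s == '.' && !st.2 then (st.1 ++ ['.'], true)
  else if s != '.' then (st.1 ++ [s], false)
  else st

def expandState (state : String × List Int) : String × List Int :=
  let state1 := state.1.toList
  let q := '?' :: state1
  let state1' := state1 ++ (q ++ q ++ q ++ q)                          -- state1 + ('?'+state1)*4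
  let state2' := state.2 ++ state.2 ++ state.2 ++ state.2 ++ state.2   -- state2 * 5
  let r := state1'.foldl expandStateLoop ([], false)
  (String.ofList r.1, state2')

-- ===== PORT B =====
def expandState_alt (state : String × List Int) : String × List Int :=
  let state1 := state.1.toList
  let q := '?' :: state1
  let state1' := state1 ++ (q ++ q ++ q ++ q)                          -- state1 + ('?'+state1)*4
  let parts := PySem.Chars.splitOn state1' ['.']                       -- state1.split('.')
  let kept := parts.filter (fun p => !p.isEmpty)                       -- [p for p in parts if p]
  let lead : List Char := if PySem.List.pyGet? parts 0 = some [] then ['.'] else []    -- '.' if parts[0] == '' else ''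
  let trail : List Char := if PySem.List.pyGet? parts (-1) = some [] then ['.'] else []  -- '.' if parts[-1] == '' else ''
  (String.ofList (lead ++ PySem.Chars.join ['.'] kept ++ trail),
   state.2 ++ state.2 ++ state.2 ++ state.2 ++ state.2)                -- state2 * 5

-- ===== PRECONDITION & SPEC =====
def Spec_expandState (state : String × List Int) (out : String × List Int) : Prop := out = expandState_alt state
instance (state : String × List Int) (out : String × List Int) : Decidable (Spec_expandState state out) := by unfold Spec_expandState; infer_instance

-- ===== CLAIM (what is proved, stated in full; the proofs are below) =====
def Claim_equal_expandState : Prop := ∀ (state : String × List Int), Dom_expandState state → Spec_expandState state (expandState state)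

-- ===== LEMMAS AND PROOFS =====

-- canonical form of A's loop: collapse with a 'previous char was a dot' flag
def dedup : List Char → Bool → List Char
  | [], _ => []
  | c :: t, d => if c = '.' then (if d then dedup t true else '.' :: dedup t true) else c :: dedup t false

theorem foldl_eq_dedup : ∀ (cs : List Char) (acc : List Char) (d : Bool),
    (cs.foldl expandStateLoop (acc, d)).1 = acc ++ dedup cs d := by
  intro cs
  induction cs with
  | nil => intro acc d; simp [dedup]
  | cons c t ih =>
    intro acc d
    by_cases hc : c = '.'
    · subst hc
      cases d with
      | false =>
        have hstep : expandStateLoop (acc, false) '.' = (acc ++ ['.'], true) := by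
          simp [expandStateLoop]
        simp only [List.foldl_cons, hstep, ih, dedup]
        simp
      | true =>
        have hstep : expandStateLoop (acc, true) '.' = (acc, true) := by
          simp [expandStateLoop]
        simp only [List.foldl_cons, hstep, ih, dedup]
        simp
    · have hstep : expandStateLoop (acc, d) c = (acc ++ [c], false) := by
        simp [expandStateLoop, hc]
      simp only [List.foldl_cons, hstep, ih, dedup, if_neg hc]
      simp

theorem dedup_append_of_no_dot (xs ys : List Char) (h : ('.' : Char) ∉ xs) :
    dedup (xs ++ ys) false = xs ++ dedup ys false := by
  induction xs with
  | nil => simp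
  | cons c t ih =>
    have hc : c ≠ '.' := fun hh => h (hh ▸ List.mem_cons_self)
    have ht : ('.' : Char) ∉ t := fun hh => h (List.mem_cons_of_mem _ hh)
    simp [dedup, hc, ih ht]

theorem dedup_true_of_head_ne (ys : List Char) (h : ∀ hd, ys.head? = some hd → hd ≠ '.') :
    dedup ys true = dedup ys false := by
  cases ys with
  | nil => rfl
  | cons c t =>
    have hc : c ≠ '.' := h c rfl
    simp [dedup, hc]

theorem dedup_replicate_dot (m : Nat) : dedup (List.replicate m '.') true = [] := by
  induction m with
  | zero => rfl
  | succ n ih => simpa [List.replicate_succ, dedup] using ih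

theorem intercalate_cons_ne_nil (p : List Char) (ps : List (List Char)) (h : ps ≠ []) :
    ['.'].intercalate (p :: ps) = p ++ '.' :: ['.'].intercalate ps := by
  obtain ⟨q, t, rfl⟩ := List.exists_cons_of_ne_nil h
  simp [List.intercalate]

theorem intercalate_all_empty (ps : List (List Char)) (h : ∀ p ∈ ps, p = []) :
    ['.'].intercalate ps = List.replicate (ps.length - 1) '.' := by
  induction ps with
  | nil => simp [List.intercalate]
  | cons p t ih =>
    have hp : p = [] := h p List.mem_cons_self
    subst hp
    cases t with
    | nil => simp [List.intercalate]
    | cons q t' =>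
      rw [intercalate_cons_ne_nil _ _ (by simp)]
      rw [ih (fun x hx => h x (List.mem_cons_of_mem _ hx))]
      simp [List.replicate_succ]

theorem getLast?_all_empty (ps : List (List Char)) (hne : ps ≠ []) (h : ∀ p ∈ ps, p = []) :
    ps.getLast? = some [] := by
  rw [List.getLast?_eq_some_iff]
  exact ⟨ps.dropLast, by
    have := h (ps.getLast hne) (List.getLast_mem hne)
    rw [← this]
    exact (List.dropLast_concat_getLast hne).symm⟩

theorem dedup_no_dot (p : List Char) (h : ('.' : Char) ∉ p) : dedup p false = p := by
  have := dedup_append_of_no_dot p [] h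
  simpa [dedup] using this

-- the master lemma: A's collapse of an intercalation equals B's filter/rejoin form
theorem dedup_intercalate : ∀ (ps : List (List Char)), ps ≠ [] →
    (∀ p ∈ ps, ('.' : Char) ∉ p) → (∃ p ∈ ps, p ≠ []) →
    dedup (['.'].intercalate ps) false =
      (if ps.head? = some [] then ['.'] else [])
        ++ ['.'].intercalate (ps.filter (fun p => !p.isEmpty))
        ++ (if ps.getLast? = some [] then ['.'] else []) := by
  intro ps
  induction ps with
  | nil => intro h; exact absurd rfl h
  | cons p ps' ih =>
    intro _ hdf hex
    have hpdf : ('.' : Char) ∉ p := hdf p List.mem_cons_self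
    cases ps' with
    | nil =>
      have hp : p ≠ [] := by
        rcases hex with ⟨w, hw, hwne⟩
        simp at hw; subst hw; exact hwne
      rw [show ['.'].intercalate [p] = p by simp [List.intercalate]]
      rw [dedup_no_dot p hpdf]
      have hpe : p.isEmpty = false := by simp [hp]
      rw [show [p].filter (fun p => !p.isEmpty) = [p] by simp [List.filter_cons, hpe]]
      rw [show ['.'].intercalate [p] = p by simp [List.intercalate]]
      rw [if_neg (by simpa using hp), if_neg (by simpa using hp)]
      simp
    | cons q ps'' =>
      rw [intercalate_cons_ne_nil p (q :: ps'') (by simp)]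
      rw [dedup_append_of_no_dot p _ hpdf]
      have hstep : dedup ('.' :: ['.'].intercalate (q :: ps'')) false
          = '.' :: dedup (['.'].intercalate (q :: ps'')) true := by simp [dedup]
      rw [hstep]
      rw [List.getLast?_cons_cons]
      by_cases hall : ∀ x ∈ q :: ps'', x = []
      · have hp : p ≠ [] := by
          rcases hex with ⟨w, hw, hwne⟩
          rcases List.mem_cons.mp hw with h1 | h1
          · exact h1 ▸ hwne
          · exact absurd (hall w h1) hwne
        rw [intercalate_all_empty _ hall, dedup_replicate_dot]
        have hlast : (q :: ps'').getLast? = some [] := getLast?_all_empty _ (by simp) hall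
        have hfilps : (q :: ps'').filter (fun p => !p.isEmpty) = [] := by
          rw [List.filter_eq_nil_iff]; intro x hx; simp [hall x hx]
        rw [hlast]
        rw [show (p :: q :: ps'').filter (fun p => !p.isEmpty) = [p] by
          simp [List.filter_cons, hfilps, hp]]
        rw [if_pos rfl, if_neg (by simpa using hp)]
        rw [show ['.'].intercalate [p] = p by simp [List.intercalate]]
        simp
      · push_neg at hall
        obtain ⟨w, hw, hwne⟩ := hall
        have ihv := ih (by simp) (fun x hx => hdf x (List.mem_cons_of_mem _ hx)) ⟨w, hw, hwne⟩
        by_cases hq : q = []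
        · subst hq
          have hps'' : ps'' ≠ [] := by
            intro h0; subst h0; simp at hw; subst hw; exact hwne rfl
          have hrest2 : ['.'].intercalate ([] :: ps'') = '.' :: ['.'].intercalate ps'' := by
            rw [intercalate_cons_ne_nil [] ps'' hps'']; simp
          have hkey : ('.' :: dedup (['.'].intercalate ([] :: ps'')) true)
              = dedup (['.'].intercalate ([] :: ps'')) false := by
            rw [hrest2]; simp [dedup]
          rw [hkey, ihv]
          rw [if_pos (by simp)]
          have hfil : (([] : List Char) :: ps'').filter (fun p => !p.isEmpty)
              = ps''.filter (fun p => !p.isEmpty) := by simp [List.filter_cons]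
          rw [hfil]
          have hfilne : ps''.filter (fun p => !p.isEmpty) ≠ [] := by
            have hw2 : w ∈ ps'' := by
              rcases List.mem_cons.mp hw with h1 | h1
              · exact absurd h1.symm (Ne.symm hwne)
              · exact h1
            intro h0
            have := List.filter_eq_nil_iff.mp h0 w hw2
            simp [hwne] at this
          by_cases hp : p = []
          · subst hp
            rw [if_pos (show (([] : List Char) :: ([] : List Char) :: ps'').head? = some [] from rfl)]
            rw [show (([] : List Char) :: ([] : List Char) :: ps'').filter (fun p => !p.isEmpty)
                = ps''.filter (fun p => !p.isEmpty) by simp [List.filter_cons]]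
            simp
          · rw [if_neg (show ¬((p :: ([] : List Char) :: ps'').head? = some []) by simpa using hp)]
            rw [show (p :: ([] : List Char) :: ps'').filter (fun p => !p.isEmpty)
                = p :: ps''.filter (fun p => !p.isEmpty) by simp [List.filter_cons, hp]]
            rw [intercalate_cons_ne_nil p _ hfilne]
            simp
        · obtain ⟨c, cl, rfl⟩ := List.exists_cons_of_ne_nil hq
          have hc : c ≠ '.' := fun h0 =>
            (hdf (c :: cl) (List.mem_cons_of_mem _ List.mem_cons_self)) (h0 ▸ List.mem_cons_self)
          have hhead : (['.'].intercalate ((c :: cl) :: ps'')).head? = some c := by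
            cases ps'' with
            | nil => simp [List.intercalate]
            | cons r t => rw [intercalate_cons_ne_nil _ _ (by simp)]; simp
          have hkey : dedup (['.'].intercalate ((c :: cl) :: ps'')) true
              = dedup (['.'].intercalate ((c :: cl) :: ps'')) false := by
            apply dedup_true_of_head_ne
            intro hd hhd
            rw [hhead] at hhd
            injection hhd with h1
            exact h1 ▸ hc
          rw [hkey, ihv]
          rw [if_neg (by simp)]
          have hfil : ((c :: cl) :: ps'').filter (fun p => !p.isEmpty)
              = (c :: cl) :: ps''.filter (fun p => !p.isEmpty) := by simp [List.filter_cons]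
          by_cases hp : p = []
          · subst hp
            rw [if_pos (show (([] : List Char) :: (c :: cl) :: ps'').head? = some [] from rfl)]
            rw [show (([] : List Char) :: (c :: cl) :: ps'').filter (fun p => !p.isEmpty)
                = ((c :: cl) :: ps'').filter (fun p => !p.isEmpty) by simp [List.filter_cons]]
            simp
          · rw [if_neg (show ¬((p :: (c :: cl) :: ps'').head? = some []) by simpa using hp)]
            rw [show (p :: (c :: cl) :: ps'').filter (fun p => !p.isEmpty)
                = p :: ((c :: cl) :: ps'').filter (fun p => !p.isEmpty) by
              simp [List.filter_cons, hp]]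
            rw [intercalate_cons_ne_nil p _ (by rw [hfil]; simp)]
            simp

-- PySem's fueled splitOn coincides with List.splitOnP for the one-char separator
theorem splitOn_go_single : ∀ (fuel : Nat) (l cur : List Char) (acc : List (List Char)), l.length < fuel →
    PySem.Chars.splitOn.go ['.'] fuel l cur acc =
      acc.reverse ++ (l.splitOnP (· == '.')).modifyHead (cur.reverse ++ ·) := by
  intro fuel
  induction fuel with
  | zero => intro l cur acc h; omega
  | succ n ih =>
    intro l cur acc h
    cases l with
    | nil =>
      simp [PySem.Chars.splitOn.go, List.splitOnP_nil]
    | cons c rest =>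
      by_cases hc : c = '.'
      · subst hc
        have hpre : List.isPrefixOf ['.'] ('.' :: rest) = true := by
          simp [List.isPrefixOf]
        rw [PySem.Chars.splitOn.go]
        simp only [hpre, if_pos]
        rw [ih _ _ _ (by simpa using Nat.lt_of_succ_lt_succ h)]
        rw [List.splitOnP_cons]
        obtain ⟨hd, tl, heq⟩ := List.exists_cons_of_ne_nil (List.splitOnP_ne_nil (· == '.') rest)
        simp [heq]
      · have hpre : List.isPrefixOf ['.'] (c :: rest) = false := by
          simp [List.isPrefixOf]
          exact fun hh => hc hh.symm
        rw [PySem.Chars.splitOn.go]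
        simp only [hpre]
        rw [if_neg (by simp)]
        rw [ih _ _ _ (by simpa using Nat.lt_of_succ_lt_succ h)]
        rw [List.splitOnP_cons]
        have hne := List.splitOnP_ne_nil (· == '.') rest
        obtain ⟨hd, tl, heq⟩ := List.exists_cons_of_ne_nil hne
        rw [heq]
        simp [hc]

theorem chars_splitOn_dot (cs : List Char) :
    PySem.Chars.splitOn cs ['.'] = cs.splitOn '.' := by
  rw [PySem.Chars.splitOn, splitOn_go_single _ _ _ _ (by omega)]
  have hne := List.splitOnP_ne_nil (· == '.') cs
  obtain ⟨hd, tl, heq⟩ := List.exists_cons_of_ne_nil hne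
  simp [List.splitOn, heq]

theorem splitOnP_no_dot : ∀ (cs : List Char), ∀ p ∈ cs.splitOnP (· == '.'), ('.' : Char) ∉ p := by
  intro cs
  induction cs with
  | nil =>
    intro p hp
    rw [List.splitOnP_nil] at hp
    simp at hp
    simp [hp]
  | cons c t ih =>
    intro p hp
    rw [List.splitOnP_cons] at hp
    by_cases hc : c = '.'
    · simp [hc] at hp
      rcases hp with hp | hp
      · simp [hp]
      · exact ih p hp
    · have hcb : (c == '.') = false := by simp [hc]
      rw [hcb, if_neg (by simp)] at hp
      obtain ⟨hd, tl, heq⟩ := List.exists_cons_of_ne_nil (List.splitOnP_ne_nil (· == '.') t)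
      rw [heq] at hp
      simp at hp
      rcases hp with hp | hp
      · subst hp
        intro hmem
        rcases List.mem_cons.mp hmem with h1 | h1
        · exact hc h1.symm
        · exact ih hd (by rw [heq]; exact List.mem_cons_self) h1
      · exact ih p (by rw [heq]; exact List.mem_cons_of_mem _ hp)

-- assembling everything for the concrete expanded string
theorem pvCollapse_eq (s1 : List Char) (hq : ('?' : Char) ∈ s1) :
    (s1.foldl expandStateLoop ([], false)).1 =
      (if PySem.List.pyGet? (PySem.Chars.splitOn s1 ['.']) 0 = some [] then ['.'] else [])
        ++ PySem.Chars.join ['.'] ((PySem.Chars.splitOn s1 ['.']).filter (fun p => !p.isEmpty))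
        ++ (if PySem.List.pyGet? (PySem.Chars.splitOn s1 ['.']) (-1) = some [] then ['.'] else []) := by
  rw [foldl_eq_dedup, chars_splitOn_dot]
  have hsp : s1.splitOn '.' = s1.splitOnP (fun x => x == '.') := rfl
  have hne : s1.splitOn '.' ≠ [] := by rw [hsp]; exact List.splitOnP_ne_nil _ _
  have hdf : ∀ p ∈ s1.splitOn '.', ('.' : Char) ∉ p := by rw [hsp]; exact splitOnP_no_dot s1
  have hinter : ['.'].intercalate (s1.splitOn '.') = s1 := List.intercalate_splitOn (xs := s1) '.'
  have hex : ∃ p ∈ s1.splitOn '.', p ≠ [] := by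
    by_contra h0
    push_neg at h0
    have hrep := intercalate_all_empty _ h0
    rw [hinter] at hrep
    rw [hrep] at hq
    have h2 := List.eq_of_mem_replicate hq
    exact absurd h2 (by decide)
  have h0 : PySem.List.pyGet? (s1.splitOn '.') 0 = (s1.splitOn '.').head? := by
    rw [PySem.List.pyGet?_zero]
    exact List.head?_eq_getElem?.symm
  have hm1 : PySem.List.pyGet? (s1.splitOn '.') (-1) = (s1.splitOn '.').getLast? :=
    PySem.List.pyGet?_neg_one _
  rw [h0, hm1]
  have hj : PySem.Chars.join ['.'] ((s1.splitOn '.').filter (fun p => !p.isEmpty))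
      = ['.'].intercalate ((s1.splitOn '.').filter (fun p => !p.isEmpty)) := rfl
  rw [hj]
  calc dedup s1 false = dedup (['.'].intercalate (s1.splitOn '.')) false := by rw [hinter]
    _ = _ := dedup_intercalate _ hne hdf hex

-- ===== VERDICT (by name: the statement is the Claim_ definition above) =====
theorem expandState_spec : Claim_equal_expandState := by
  intro state _
  unfold Spec_expandState expandState expandState_alt
  dsimp only
  rw [Prod.mk.injEq]
  refine ⟨?_, rfl⟩
  apply congrArg
  exact pvCollapse_eq _ (by simp)
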